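-- pv_equiv track=rewrite | github.com/subhranil-gen-ai/DSA-DAY3-Arrays | element_with_min_non_zero_freq.py | element_with_min_non_zero_freq
-- ===== SOURCE A (Python) =====
-- def element_with_min_non_zero_freq(arr):
--   freq={}
--   for i in arr:
--     if i in freq:
--       freq[i] += 1
--     else:
--       freq[i] =1
--   min_count=min(freq.values())
--   elements=[key for key,value in freq.items() if value==min_count]
--   return elements
-- ===== SOURCE B (Python) =====
-- def element_with_min_non_zero_freq(arr):
--   freq = {}
--   for i in arr:
--     freq[i] = freq.get(i, 0) + 1
--   buckets = {}
--   for k, v in freq.items():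
--     buckets.setdefault(v, []).append(k)
--   return buckets[min(buckets)]
-- ===== Notes on version B (the rewrite author's own statement) =====
-- stated objective: alternative
-- what changed: Instead of computing the scalar minimum of the counts and then re-filtering the frequency dict, B inverts the frequency dict into a count->elements buckets dict built in one pass and returns the bucket of the smallest count.
import Mathlib
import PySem

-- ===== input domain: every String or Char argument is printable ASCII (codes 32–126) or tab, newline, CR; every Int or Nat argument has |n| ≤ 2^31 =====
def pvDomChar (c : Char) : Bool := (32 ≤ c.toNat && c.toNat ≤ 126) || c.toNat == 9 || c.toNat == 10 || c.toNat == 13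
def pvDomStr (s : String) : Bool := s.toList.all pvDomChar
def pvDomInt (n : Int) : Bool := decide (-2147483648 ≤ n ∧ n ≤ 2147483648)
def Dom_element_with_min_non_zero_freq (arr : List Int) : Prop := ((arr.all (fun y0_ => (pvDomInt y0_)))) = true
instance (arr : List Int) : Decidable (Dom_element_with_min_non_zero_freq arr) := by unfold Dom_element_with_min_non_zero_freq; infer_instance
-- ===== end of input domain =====

-- B replaces "min of counts then re-filter" by an inverted count->elements buckets dict; alternative decomposition, same cost.


-- ===== PORT A =====
def element_with_min_non_zero_freq (arr : List Int) : List Int :=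
  let freq := arr.foldl
    (fun d i => if d.contains i then d.insert i (d.getD i 0 + 1) else d.insert i 1)
    (PySem.Dict.empty : PySem.Dict Int Int)
  match PySem.List.min? freq.values (fun v => v) with
  | none   => []   -- Python raises ValueError here (only arr = []); excluded by Pre_
  | some m => (freq.items.filter (fun p => p.2 == m)).map (·.1)

-- ===== PORT B =====
def element_with_min_non_zero_freq_alt (arr : List Int) : List Int :=
  let freq := arr.foldl (fun d i => d.insert i (d.getD i 0 + 1))
    (PySem.Dict.empty : PySem.Dict Int Int)
  let buckets := freq.items.foldl
    (fun b p => b.modify p.2 ([] : List Int) (· ++ [p.1]))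
    (PySem.Dict.empty : PySem.Dict Int (List Int))
  match PySem.List.min? buckets.keys (fun v => v) with
  | none   => []   -- Python raises ValueError here (only arr = []); excluded by Pre_
  | some m => buckets.getD m []

-- ===== PRECONDITION & SPEC =====
-- Pre_ excludes only the empty list, on which Python's min() raises ValueError (in A and in B alike).
def Pre_element_with_min_non_zero_freq (arr : List Int) : Prop := arr ≠ []
instance (arr : List Int) : Decidable (Pre_element_with_min_non_zero_freq arr) := by
  unfold Pre_element_with_min_non_zero_freq; infer_instance
def pvWitness_element_with_min_non_zero_freq : List Int := [3, 1, 3]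

def Spec_element_with_min_non_zero_freq (arr : List Int) (out : List Int) : Prop :=
  out = element_with_min_non_zero_freq_alt arr
instance (arr : List Int) (out : List Int) : Decidable (Spec_element_with_min_non_zero_freq arr out) := by
  unfold Spec_element_with_min_non_zero_freq; infer_instance

-- ===== CLAIM (what is proved, stated in full; the proofs are below) =====
def Claim_equal_element_with_min_non_zero_freq : Prop :=
  ∀ (arr : List Int), Dom_element_with_min_non_zero_freq arr →
    Pre_element_with_min_non_zero_freq arr →
    Spec_element_with_min_non_zero_freq arr (element_with_min_non_zero_freq arr)

-- ===== LEMMAS AND PROOFS =====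

-- A's count loop (contains-test then insert) computes the same dict as B's get-based loop.
lemma freq_loops_eq (arr : List Int) :
    arr.foldl
      (fun (d : PySem.Dict Int Int) i =>
        if d.contains i then d.insert i (d.getD i 0 + 1) else d.insert i 1)
      PySem.Dict.empty
    = arr.foldl (fun d i => d.insert i (d.getD i 0 + 1)) PySem.Dict.empty := by
  have hstep : (fun (d : PySem.Dict Int Int) i =>
      if d.contains i then d.insert i (d.getD i 0 + 1) else d.insert i 1)
      = fun d i => d.insert i (d.getD i 0 + 1) := by
    funext d i
    by_cases h : d.contains i = true
    · simp [h]
    · simp only [Bool.not_eq_true] at h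
      simp [h, PySem.Dict.getD_of_not_contains d 0 h]
  rw [hstep]

-- B's bucket of count c is exactly the comprehension A forms for min_count = c.
lemma buckets_getD (l : List (Int × Int)) (c : Int) :
    ((l.foldl (fun (b : PySem.Dict Int (List Int)) p => b.modify p.2 ([] : List Int) (· ++ [p.1]))
        PySem.Dict.empty).getD c [])
    = (l.filter (fun p => p.2 == c)).map (·.1) := by
  have hswap :
      l.foldl (fun (b : PySem.Dict Int (List Int)) p => b.modify p.2 ([] : List Int) (· ++ [p.1]))
        PySem.Dict.empty
      = (l.map (fun p => (p.2, p.1))).foldl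
          (fun (b : PySem.Dict Int (List Int)) p => b.modify p.1 ([] : List Int) (· ++ [p.2]))
          PySem.Dict.empty := by
    rw [List.foldl_map]
  rw [hswap, PySem.Dict.getD_foldl_modify_append]
  simp [PySem.Dict.getD_empty, List.filter_map, Function.comp_def]

-- the keys of B's buckets dict are the distinct values of freq
lemma buckets_keys (l : List (Int × Int)) (x : Int) :
    x ∈ (l.foldl (fun (b : PySem.Dict Int (List Int)) p => b.modify p.2 ([] : List Int) (· ++ [p.1]))
        PySem.Dict.empty).keys ↔ x ∈ l.map (·.2) := by
  have h := PySem.Dict.keys_foldl_modify_key l (key := fun p => p.2) (d0 := ([] : List Int))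
      (f := fun (b : PySem.Dict Int (List Int)) p => (· ++ [p.1])) (d := PySem.Dict.empty)
  simp only [h, PySem.Dict.keys_empty, PySem.Set.update_nil_left]
  exact PySem.Set.mem_ofList _ _

-- min over Ints is determined by membership: two min?-results of lists with the same members coincide
lemma min_value_eq {l₁ l₂ : List Int} {m₁ m₂ : Int}
    (hmem : ∀ x, x ∈ l₁ ↔ x ∈ l₂)
    (h₁ : PySem.List.min? l₁ (fun v => v) = some m₁)
    (h₂ : PySem.List.min? l₂ (fun v => v) = some m₂) : m₁ = m₂ := by
  have hm₁ := PySem.List.min?_mem h₁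
  have hm₂ := PySem.List.min?_mem h₂
  have hle₁ := PySem.List.min?_isMin h₁ m₂ ((hmem m₂).mpr hm₂)
  have hle₂ := PySem.List.min?_isMin h₂ m₁ ((hmem m₁).mp hm₁)
  omega

-- ===== VERDICT (by name: the statement is the Claim_ definition above) =====
theorem element_with_min_non_zero_freq_spec : Claim_equal_element_with_min_non_zero_freq := by
  intro arr _ hpre
  unfold Spec_element_with_min_non_zero_freq
  unfold element_with_min_non_zero_freq element_with_min_non_zero_freq_alt
  simp only [freq_loops_eq]
  set freq := arr.foldl (fun (d : PySem.Dict Int Int) i => d.insert i (d.getD i 0 + 1))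
    PySem.Dict.empty with hfreq
  set buckets := freq.items.foldl
    (fun (b : PySem.Dict Int (List Int)) p => b.modify p.2 ([] : List Int) (· ++ [p.1]))
    PySem.Dict.empty with hbuckets
  -- freq is nonempty because arr is
  have hvals : freq.values ≠ [] := by
    have hc : freq = PySem.Dict.counter arr := by
      rw [hfreq, PySem.Dict.foldl_insert_getD_add_one_eq_counter]
    rw [hc]
    cases arr with
    | nil => exact absurd rfl hpre
    | cons a t =>
      simp [PySem.Dict.values, PySem.Dict.items_counter, PySem.Set.ofList_cons]
  -- both min? calls succeed
  obtain ⟨mA, hmA⟩ : ∃ m, PySem.List.min? freq.values (fun v => v) = some m := by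
    cases h : PySem.List.min? freq.values (fun v => v) with
    | none => exact absurd ((PySem.List.min?_eq_none_iff _ _).mp h) hvals
    | some m => exact ⟨m, rfl⟩
  have hkv : ∀ x, x ∈ buckets.keys ↔ x ∈ freq.values := by
    intro x
    rw [hbuckets, buckets_keys]
    simp only [PySem.Dict.values]
  obtain ⟨mB, hmB⟩ : ∃ m, PySem.List.min? buckets.keys (fun v => v) = some m := by
    cases h : PySem.List.min? buckets.keys (fun v => v) with
    | none =>
      have hknil := (PySem.List.min?_eq_none_iff _ _).mp h
      cases hv : freq.values with
      | nil => exact absurd hv hvals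
      | cons v t =>
        have hvk : v ∈ buckets.keys := (hkv v).mpr (by rw [hv]; exact List.mem_cons_self)
        rw [hknil] at hvk
        exact absurd hvk (List.not_mem_nil)
    | some m => exact ⟨m, rfl⟩
  have hmm : mA = mB := min_value_eq (fun x => (hkv x).symm) hmA hmB
  rw [hmA, hmB]
  simp only [hmm]
  rw [hbuckets, buckets_getD]
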